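-- pv_equiv track=rewrite | github.com/anthonytk31415/leetcode | python-fundamentals/trees/isEvenOddTree.py | odd_cond
-- ===== SOURCE A (Python) =====
-- def odd_cond(arr):
--     if not arr:
--         return True
--     prev = arr[0]
--     if prev % 2 != 0:
--         return False
--     for i in range(1, len(arr)):
--         if arr[i] % 2 !=0:
--             return False
--         if arr[i] >= prev:
--             return False
--         prev = arr[i]
--     return True
-- ===== SOURCE B (Python) =====
-- def odd_cond(arr):
--     if any(x % 2 for x in arr):
--         return False
--     return arr == sorted(set(arr), reverse=True)
-- ===== Notes on version B (the rewrite author's own statement) =====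
-- stated objective: alternative
-- what changed: Replaced A's single fused index loop with a prev accumulator and early returns by a parity pass plus a sort-based strictness test: the list is strictly decreasing iff it equals the reverse-sorted list of its distinct elements (sorted(set(arr), reverse=True)).
import Mathlib
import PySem

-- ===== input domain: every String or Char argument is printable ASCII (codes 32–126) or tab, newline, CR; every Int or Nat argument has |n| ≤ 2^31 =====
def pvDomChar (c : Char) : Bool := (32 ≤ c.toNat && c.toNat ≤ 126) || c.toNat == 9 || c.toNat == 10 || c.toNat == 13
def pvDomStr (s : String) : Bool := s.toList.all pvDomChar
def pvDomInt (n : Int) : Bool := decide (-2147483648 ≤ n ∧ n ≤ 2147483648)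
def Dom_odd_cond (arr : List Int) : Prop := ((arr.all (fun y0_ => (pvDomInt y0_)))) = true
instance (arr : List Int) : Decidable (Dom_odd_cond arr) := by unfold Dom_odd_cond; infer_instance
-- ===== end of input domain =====

-- B replaces A's fused index loop (parity + prev comparison with early returns) by a parity pass
-- plus a sort-based strictness test: the list is strictly decreasing iff it equals
-- sorted(set(arr), reverse=True) (alternative formulation, O(n log n)).

-- ===== PORT A =====
-- A's for-loop carrying `prev` becomes structural recursion carrying prev.
def oddLoopA (prev : Int) : List Int → Bool
  | [] => true
  | x :: xs =>
    if PySem.Int.mod x 2 ≠ 0 then false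
    else if x ≥ prev then false
    else oddLoopA x xs

def odd_cond (arr : List Int) : Bool :=
  match arr with
  | [] => true
  | p :: rest => if PySem.Int.mod p 2 ≠ 0 then false else oddLoopA p rest

-- ===== PORT B =====
-- B: `if any(x % 2 for x in arr): return False` then `arr == sorted(set(arr), reverse=True)`.
def odd_cond_alt (arr : List Int) : Bool :=
  if arr.any (fun x => !(PySem.Int.mod x 2 == 0)) then false
  else arr == PySem.List.sorted (PySem.Set.ofList arr) (fun x => x) true

-- ===== PRECONDITION & SPEC =====
def Spec_odd_cond (arr : List Int) (out : Bool) : Prop := out = odd_cond_alt arr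
instance (arr : List Int) (out : Bool) : Decidable (Spec_odd_cond arr out) := by unfold Spec_odd_cond; infer_instance

-- ===== CLAIM (what is proved, stated in full; the proofs are below) =====
def Claim_equal_odd_cond : Prop := ∀ (arr : List Int), Dom_odd_cond arr → Spec_odd_cond arr (odd_cond arr)

-- ===== LEMMAS AND PROOFS =====
-- A's loop separates into the parity pass and strict-decrease (Pairwise) of the whole list.
theorem oddLoopA_eq (rest : List Int) : ∀ (p : Int),
    oddLoopA p rest =
      ((rest.all (fun x => PySem.Int.mod x 2 == 0)) &&
        decide ((p :: rest).Pairwise (· > ·))) := by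
  induction rest with
  | nil => intro p; simp [oddLoopA]
  | cons x xs ih =>
    intro p
    simp only [oddLoopA, List.all_cons]
    have hf : x.fmod 2 = x % 2 := by simp [Int.fmod_eq_emod]
    by_cases hm : x % 2 = 0
    · by_cases hge : x ≥ p
      · have hnp : ¬ (p :: x :: xs).Pairwise (· > ·) := by
          intro h
          have := (List.pairwise_cons.mp h).1 x (by simp)
          omega
        simp [PySem.Int.mod, hf, hm, hge, hnp]
      · rw [if_neg (by simp [PySem.Int.mod, hf, hm]), if_neg (by omega), ih x]
        by_cases hp : (x :: xs).Pairwise (· > ·)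
        · have hpp : (p :: x :: xs).Pairwise (· > ·) := by
            refine List.pairwise_cons.mpr ⟨?_, hp⟩
            intro y hy
            rcases List.mem_cons.mp hy with rfl | hy'
            · omega
            · have := (List.pairwise_cons.mp hp).1 y hy'
              omega
          simp only [hp, hpp, decide_true, Bool.and_true]
          simp [PySem.Int.mod, hf, hm]
        · have hnp : ¬ (p :: x :: xs).Pairwise (· > ·) := fun h => hp (List.pairwise_cons.mp h).2
          simp [hp, hnp]
    · simp [PySem.Int.mod, hf, hm]

-- Strictly decreasing ↔ the list equals the reverse-sorted list of its distinct elements.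
theorem pairwise_gt_iff_sorted (arr : List Int) :
    arr.Pairwise (· > ·) ↔ arr = PySem.List.sorted (PySem.Set.ofList arr) (fun x => x) true := by
  constructor
  · intro h
    have hnd : arr.Nodup := h.imp (fun hab => by omega)
    have hof : PySem.Set.ofList arr = arr := PySem.Set.ofList_eq_self_of_nodup arr hnd
    rw [hof]
    exact (PySem.List.sorted_rev_eq_of_perm_of_pairwise_gt arr arr (fun x => x) (List.Perm.refl arr) h).symm
  · intro h
    have hge : arr.Pairwise (fun a b => (fun x => x) b ≤ (fun x => x) a) := by
      rw [h]; exact PySem.List.sorted_pairwise_rev _ _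
    have hnd : arr.Nodup := by
      rw [h]
      exact ((PySem.List.sorted_perm _ _ _).nodup_iff).mpr (PySem.Set.nodup_ofList arr)
    exact (hge.and hnd).imp (fun ⟨hle, hne⟩ => by simp only at hle; omega)

-- ===== VERDICT (by name: the statement is the Claim_ definition above) =====
theorem odd_cond_spec : Claim_equal_odd_cond := by
  intro arr _
  unfold Spec_odd_cond
  cases arr with
  | nil => rfl
  | cons p rest =>
    simp only [odd_cond, odd_cond_alt]
    have hf : p.fmod 2 = p % 2 := by simp [Int.fmod_eq_emod]
    by_cases hm : p % 2 = 0
    · rw [if_neg (by simp [PySem.Int.mod, hf, hm]), oddLoopA_eq]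
      by_cases he : (rest.all (fun x => PySem.Int.mod x 2 == 0)) = true
      · have hany : ((p :: rest).any (fun x => !(PySem.Int.mod x 2 == 0))) = false := by
          rw [List.any_eq_false]
          intro x hx
          rcases List.mem_cons.mp hx with rfl | hx'
          · simp [PySem.Int.mod, hf, hm]
          · simpa using List.all_eq_true.mp he x hx'
        rw [hany, if_neg (by simp), he, Bool.true_and]
        have hiff := pairwise_gt_iff_sorted (p :: rest)
        by_cases hc : (p :: rest).Pairwise (· > ·)
        · have hq : ((p :: rest) == PySem.List.sorted (PySem.Set.ofList (p :: rest)) (fun x => x) true) = true := by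
            rw [beq_iff_eq]; exact hiff.mp hc
          rw [hq, decide_eq_true hc]
        · have hq : ((p :: rest) == PySem.List.sorted (PySem.Set.ofList (p :: rest)) (fun x => x) true) = false := by
            rw [beq_eq_false_iff_ne]; exact fun h => hc (hiff.mpr h)
          rw [hq, decide_eq_false hc]
      · rw [List.all_eq_true] at he
        push Not at he
        obtain ⟨x, hx, hxo⟩ := he
        have hany : ((p :: rest).any (fun x => !(PySem.Int.mod x 2 == 0))) = true := by
          rw [List.any_eq_true]
          exact ⟨x, List.mem_cons_of_mem _ hx, by simpa using hxo⟩
        have hfalse : (rest.all (fun x => PySem.Int.mod x 2 == 0)) = false := by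
          rw [List.all_eq_false]
          exact ⟨x, hx, hxo⟩
        rw [hany, if_pos rfl, hfalse, Bool.false_and]
    · have hany : ((p :: rest).any (fun x => !(PySem.Int.mod x 2 == 0))) = true := by
        rw [List.any_cons]
        simp [PySem.Int.mod, hf, hm]
      rw [if_pos (by simp [PySem.Int.mod, hf, hm]), hany, if_pos rfl]
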